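-- pv_equiv track=rewrite | github.com/lamdalamda/.leetcode | 15.3-sum.py | special_case
-- ===== SOURCE A (Python) =====
-- def special_case(nums):
--     count=0
--     for i in nums:
--         if i==0:
--             count+=1
--     if len(nums)<3:
--         return 1
--     if min(nums)>0:
--         return 1
--     if max(nums)<0:
--         return 1
--     if count>2:
--         return 0
--     return 2
-- ===== SOURCE B (Python) =====
-- def special_case(nums):
--     if len(nums) < 3:
--         return 1
--     s = sorted(nums)
--     if s[0] > 0 or s[-1] < 0:
--         return 1
--     if any(s[i] == 0 and s[i + 2] == 0 for i in range(len(s) - 2)):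
--         return 0
--     return 2
-- ===== Notes on version B (the rewrite author's own statement) =====
-- stated objective: alternative
-- what changed: B sorts nums and reads everything off the sorted order: the first and last elements of the sorted list replace the min() and max() scans, and 'more than two zeros' becomes the existence of an index i with a zero at both i and i+2 in the sorted list, replacing A's zero-counting loop entirely.
import Mathlib
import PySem

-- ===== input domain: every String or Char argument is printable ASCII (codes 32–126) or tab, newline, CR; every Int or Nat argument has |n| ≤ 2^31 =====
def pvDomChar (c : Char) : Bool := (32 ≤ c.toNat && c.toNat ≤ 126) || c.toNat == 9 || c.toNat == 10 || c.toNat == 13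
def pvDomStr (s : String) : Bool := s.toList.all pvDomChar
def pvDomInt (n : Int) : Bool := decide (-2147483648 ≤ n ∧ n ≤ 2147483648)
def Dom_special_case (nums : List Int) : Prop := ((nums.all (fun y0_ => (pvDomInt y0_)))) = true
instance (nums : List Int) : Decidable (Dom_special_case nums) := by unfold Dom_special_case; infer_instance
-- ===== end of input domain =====

-- B sorts nums and reads the answer off the sorted order (the ends replace min()/max(), and a
-- zero two indices apart replaces the zero-counting loop); alternative algorithm, not claimed faster.

-- ===== PORT A =====
def special_case (nums : List Int) : Int :=
  let count := nums.foldl (fun c i => if i == 0 then c + 1 else c) (0 : Int)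
  if nums.length < 3 then 1
  else if (PySem.List.min? nums (fun x => x)).getD 0 > 0 then 1  -- nums ≠ [] here, so getD's default is never used
  else if (PySem.List.max? nums (fun x => x)).getD 0 < 0 then 1
  else if count > 2 then 0
  else 2

-- ===== PORT B =====
def special_case_alt (nums : List Int) : Int :=
  if nums.length < 3 then 1
  else
    let s := PySem.List.sorted nums (fun x => x) false
    -- s[0] / s[-1]: length ≥ 3 here, so the getD defaults are never used
    if (PySem.List.pyGet? s 0).getD 0 > 0 ∨ (PySem.List.pyGet? s (-1)).getD 0 < 0 then 1
    else if (PySem.List.pyRange 0 ((s.length : Int) - 2) 1).any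
              (fun i => PySem.List.pyGet? s i == some 0 && PySem.List.pyGet? s (i + 2) == some 0) then 0
    else 2

-- ===== PRECONDITION & SPEC =====
def Spec_special_case (nums : List Int) (out : Int) : Prop := out = special_case_alt nums
instance (nums : List Int) (out : Int) : Decidable (Spec_special_case nums out) := by unfold Spec_special_case; infer_instance

-- ===== CLAIM (what is proved, stated in full; the proofs are below) =====
def Claim_equal_special_case : Prop := ∀ (nums : List Int), Dom_special_case nums → Spec_special_case nums (special_case nums)

-- ===== LEMMAS AND PROOFS =====

-- a ≤-sorted list of nonnegatives containing at least two zeros starts with 0, 0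
theorem sorted_zero_prefix (t : List Int) (hpw : t.Pairwise (· ≤ ·))
    (hnn : ∀ y ∈ t, (0:Int) ≤ y) (hc : 2 ≤ t.count 0) :
    ∃ t', t = 0 :: 0 :: t' := by
  match t, hpw with
  | [], _ => simp at hc
  | [y], _ =>
      have := List.count_le_length (l := [y]) (a := (0:Int))
      simp at this; omega
  | y :: z :: t', hpw =>
      rw [List.pairwise_cons] at hpw
      obtain ⟨hyall, hpw2⟩ := hpw
      rw [List.pairwise_cons] at hpw2
      obtain ⟨hzall, _⟩ := hpw2
      have hy0 : y = 0 := by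
        by_contra hy
        have hypos : 0 < y := lt_of_le_of_ne (hnn y (by simp)) (Ne.symm hy)
        have hmem : (0:Int) ∈ y :: z :: t' := List.count_pos_iff.mp (by omega)
        rcases List.mem_cons.mp hmem with h0 | hm
        · exact hy h0.symm
        · have := hyall 0 hm; omega
      subst hy0
      have hc' : 1 ≤ (z :: t').count 0 := by
        rw [List.count_cons_self] at hc; omega
      have hz0 : z = 0 := by
        by_contra hz
        have hzpos : 0 < z := lt_of_le_of_ne (hnn z (by simp)) (Ne.symm hz)
        have hmem : (0:Int) ∈ z :: t' := List.count_pos_iff.mp (by omega)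
        rcases List.mem_cons.mp hmem with h0 | hm
        · exact hz h0.symm
        · have := hzall 0 hm; omega
      exact ⟨t', by rw [hz0]⟩

-- in a ≤-sorted list, count 0 ≥ 3 ↔ some index i carries 0 at i and at i+2
theorem sorted_window_iff (s : List Int) (hpw : s.Pairwise (· ≤ ·)) :
    (∃ i : Nat, i + 2 < s.length ∧ s[i]? = some 0 ∧ s[i+2]? = some 0) ↔ 3 ≤ s.count 0 := by
  constructor
  · rintro ⟨i, hlen, h1, h2⟩
    have hi : i < s.length := by omega
    have hi1 : i + 1 < s.length := by omega
    have hg1 : s[i] = 0 := by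
      have := List.getElem?_eq_getElem hi; rw [this] at h1; exact Option.some_injective _ h1
    have hg2 : s[i+2] = 0 := by
      have := List.getElem?_eq_getElem hlen; rw [this] at h2; exact Option.some_injective _ h2
    have hmono := List.pairwise_iff_getElem.mp hpw
    have hmid : s[i+1] = 0 := by
      have a1 := hmono i (i+1) hi hi1 (by omega)
      have a2 := hmono (i+1) (i+2) hi1 hlen (by omega)
      omega
    have hdrop : s.drop i = s[i] :: s[i+1] :: s[i+2] :: s.drop (i+3) := by
      rw [List.drop_eq_getElem_cons hi, List.drop_eq_getElem_cons hi1,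
          List.drop_eq_getElem_cons hlen]
    have hsub : (s.drop i).count 0 ≤ s.count 0 := (List.drop_sublist i s).count_le 0
    rw [hdrop, hg1, hg2, hmid] at hsub
    simp [List.count_cons_self] at hsub
    omega
  · intro hc
    induction s with
    | nil => simp at hc
    | cons x t ih =>
        rw [List.pairwise_cons] at hpw
        obtain ⟨hxall, hpw'⟩ := hpw
        by_cases hx : x = 0
        · subst hx
          have hc' : 2 ≤ t.count 0 := by rw [List.count_cons_self] at hc; omega
          obtain ⟨t', rfl⟩ := sorted_zero_prefix t hpw' hxall hc'
          exact ⟨0, by simp, by simp, by simp⟩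
        · have hc' : 3 ≤ t.count 0 := by
            rw [List.count_cons] at hc
            simpa [hx] using hc
          obtain ⟨i, hl, h1, h2⟩ := ih hpw' hc'
          exact ⟨i + 1, by simp; omega, by simpa using h1, by simpa using h2⟩

-- the head of sorted(nums) is min(nums)
theorem first_eq_min (nums : List Int) :
    PySem.List.pyGet? (PySem.List.sorted nums (fun x => x) false) 0
      = PySem.List.min? nums (fun x => x) := by
  rcases hs : PySem.List.sorted nums (fun x => x) false with _ | ⟨m, t⟩
  · have hnil : nums = [] := (PySem.List.sorted_eq_nil_iff nums (fun x => x) false).mp hs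
    subst hnil
    rfl
  · have hperm : (m :: t).Perm nums := hs ▸ PySem.List.sorted_perm nums (fun x => x) false
    have hne : nums ≠ [] := by
      intro h; subst h; exact absurd hperm.length_eq (by simp)
    rcases hmin : PySem.List.min? nums (fun x => x) with _ | v
    · exact absurd ((PySem.List.min?_eq_none_iff nums (fun x => x)).mp hmin) hne
    · have hv1 : v ∈ nums := PySem.List.min?_mem hmin
      have hv2 : ∀ y ∈ nums, v ≤ y := by
        have := PySem.List.min?_isMin hmin; simpa using this
      have hm_mem : m ∈ nums := hperm.subset (by simp)
      have h1 : v ≤ m := hv2 m hm_mem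
      have h2 : m ≤ v := by
        have := PySem.List.key_head_sorted_le nums (fun x => x) hs
        simpa using this v hv1
      have : m = v := le_antisymm h2 h1
      simp [this]

-- the last element of sorted(nums) is max(nums)
theorem last_eq_max (nums : List Int) :
    PySem.List.pyGet? (PySem.List.sorted nums (fun x => x) false) (-1)
      = PySem.List.max? nums (fun x => x) := by
  rcases hnil : nums with _ | ⟨a, l⟩
  · rfl
  · rw [← hnil]
    have hne : nums ≠ [] := by simp [hnil]
    set s := PySem.List.sorted nums (fun x => x) false with hsdef
    have hperm : s.Perm nums := PySem.List.sorted_perm nums (fun x => x) false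
    have hsne : s ≠ [] := by
      intro h
      exact hne ((PySem.List.sorted_eq_nil_iff nums (fun x => x) false).mp h)
    have hpw : s.Pairwise (· ≤ ·) := by
      simpa using PySem.List.sorted_pairwise nums (fun x => x)
    have hlast : s.getLast? = some (s.getLast hsne) := List.getLast?_eq_some_getLast hsne
    rcases hmax : PySem.List.max? nums (fun x => x) with _ | w
    · exact absurd ((PySem.List.max?_eq_none_iff nums (fun x => x)).mp hmax) hne
    · have hw1 : w ∈ nums := PySem.List.max?_mem hmax
      have hw2 : ∀ y ∈ nums, y ≤ w := by
        have := PySem.List.max?_isMax hmax; simpa using this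
      have hL_mem : s.getLast hsne ∈ nums := hperm.subset (List.getLast_mem hsne)
      have hle : ∀ y ∈ s, y ≤ s.getLast hsne := by
        intro y hy
        obtain ⟨p, hp, rfl⟩ := List.mem_iff_getElem.mp hy
        rw [List.getLast_eq_getElem]
        rcases Nat.lt_or_ge p (s.length - 1) with h | h
        · exact List.pairwise_iff_getElem.mp hpw p (s.length - 1)
            hp (by omega) h
        · have hpe : p = s.length - 1 := by
            have : 0 < s.length := List.length_pos_iff.mpr hsne
            omega
          subst hpe; exact le_refl _
      have h1 : w ≤ s.getLast hsne := hle w (hperm.mem_iff.mpr hw1)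
      have h2 : s.getLast hsne ≤ w := hw2 _ hL_mem
      rw [PySem.List.pyGet?_neg_one, hlast, le_antisymm h1 h2]

-- ===== VERDICT (by name: the statement is the Claim_ definition above) =====
theorem special_case_spec : Claim_equal_special_case := by
  intro nums _
  unfold Spec_special_case special_case special_case_alt
  by_cases h3 : nums.length < 3
  · simp [h3]
  · simp only [h3, if_false]
    set s := PySem.List.sorted nums (fun x => x) false with hsdef
    have hperm : s.Perm nums := PySem.List.sorted_perm nums (fun x => x) false
    have hlen : s.length = nums.length := hperm.length_eq
    have hpw : s.Pairwise (· ≤ ·) := by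
      simpa using PySem.List.sorted_pairwise nums (fun x => x)
    have hminEq : PySem.List.pyGet? s 0 = PySem.List.min? nums (fun x => x) :=
      first_eq_min nums
    have hmaxEq : PySem.List.pyGet? s (-1) = PySem.List.max? nums (fun x => x) :=
      last_eq_max nums
    have hcount : nums.foldl (fun c i => if i == 0 then c + 1 else c) (0:Int)
        = (s.count 0 : Int) := by
      rw [PySem.List.foldl_beq_add_one, hperm.count_eq]; ring
    have hany : ((PySem.List.pyRange 0 ((s.length : Int) - 2) 1).any
          (fun i => PySem.List.pyGet? s i == some 0 && PySem.List.pyGet? s (i + 2) == some 0) = true)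
        ↔ 3 ≤ s.count 0 := by
      rw [← sorted_window_iff s hpw, List.any_eq_true]
      constructor
      · rintro ⟨i, hi, hfi⟩
        rw [PySem.List.mem_pyRange_one] at hi
        obtain ⟨hi0, hi2⟩ := hi
        rw [Bool.and_eq_true, beq_iff_eq, beq_iff_eq,
            PySem.List.pyGet?_of_nonneg s hi0, PySem.List.pyGet?_of_nonneg s (by omega : (0:Int) ≤ i + 2)] at hfi
        obtain ⟨h1, h2⟩ := hfi
        refine ⟨i.toNat, by omega, h1, ?_⟩
        have : (i + 2).toNat = i.toNat + 2 := by omega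
        rwa [this] at h2
      · rintro ⟨k, hk, h1, h2⟩
        refine ⟨(k : Int), ?_, ?_⟩
        · rw [PySem.List.mem_pyRange_one]
          constructor
          · exact_mod_cast Nat.zero_le k
          · omega
        · rw [Bool.and_eq_true, beq_iff_eq, beq_iff_eq]
          constructor
          · rw [PySem.List.pyGet?_natCast]; exact h1
          · have hkc : ((k : Int) + 2) = ((k + 2 : Nat) : Int) := by push_cast; ring
            rw [hkc, PySem.List.pyGet?_natCast]; exact h2
    rw [hminEq, hmaxEq]
    by_cases hm : (PySem.List.min? nums (fun x => x)).getD 0 > 0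
    · rw [if_pos hm, if_pos (Or.inl hm)]
    · by_cases hM : (PySem.List.max? nums (fun x => x)).getD 0 < 0
      · rw [if_neg hm, if_pos hM, if_pos (Or.inr hM)]
      · rw [if_neg hm, if_neg hM, if_neg (not_or.mpr ⟨hm, hM⟩)]
        by_cases hc : 3 ≤ s.count 0
        · have hcI : nums.foldl (fun c i => if i == 0 then c + 1 else c) (0:Int) > 2 := by
            rw [hcount]; exact_mod_cast hc
          rw [if_pos hcI, if_pos (hany.mpr hc)]
        · have hcI : ¬ nums.foldl (fun c i => if i == 0 then c + 1 else c) (0:Int) > 2 := by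
            rw [hcount]; intro h; exact hc (by exact_mod_cast h)
          rw [if_neg hcI, if_neg (fun h => hc (hany.mp h))]
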